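-- pv_equiv track=rewrite | github.com/neel3o115/cf-archives | neel/B_The_Recursive_Sequence_Problem.py | rec
-- ===== SOURCE A (Python) =====
-- dp = {}
--
-- def lnn(n):
--     if n <= 1:
--         return 1
--
--     if n in dp:
--         return dp[n]
--
--     dp[n] = 2*lnn(n//2)+1
--     return dp[n]
--
-- def rec(n,k):
--     if n == 1:
--         return 1
--
--     nee = lnn(n)//2+1
--
--     if k == nee:
--         return n%2
--
--     if k > nee:
--         return rec(n//2,k-(nee))
--
--     if k < nee:
--         return rec(n//2,k)
-- ===== SOURCE B (Python) =====
-- def rec(n, k):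
--     while n != 1:
--         nee = 1 if n <= 1 else (1 << (n.bit_length() - 1))
--         if k == nee:
--             return n % 2
--         if k > nee:
--             k -= nee
--         n //= 2
--     return 1
-- ===== Notes on version B (the rewrite author's own statement) =====
-- stated objective: simpler
-- what changed: Replaces the memoized lnn recursion plus a global dict and recursive rec with a flat iterative loop that computes the midpoint in closed form as the largest power of two <= n (via bit_length).
-- outside the precondition, e.g. on rec(0, 5): A returns 0, B returns 0; on rec(-3, 2): A returns 0, B returns 0
import Mathlib
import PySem

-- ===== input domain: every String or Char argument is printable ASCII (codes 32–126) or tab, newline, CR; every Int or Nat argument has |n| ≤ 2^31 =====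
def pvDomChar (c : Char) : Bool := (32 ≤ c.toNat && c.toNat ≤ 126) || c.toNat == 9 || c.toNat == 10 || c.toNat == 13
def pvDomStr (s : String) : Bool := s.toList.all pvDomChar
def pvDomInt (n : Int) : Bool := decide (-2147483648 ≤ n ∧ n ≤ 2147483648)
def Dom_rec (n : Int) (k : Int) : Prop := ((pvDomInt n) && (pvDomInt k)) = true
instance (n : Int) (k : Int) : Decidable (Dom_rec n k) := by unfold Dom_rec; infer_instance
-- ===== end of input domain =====

-- B replaces A's memoized lnn-dict recursion by a flat loop with a closed-form power-of-two
-- midpoint (objective: simpler). Equality of return values is proved on Pre_rec (n ≥ 1).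

-- ===== PORT A =====
-- lnn threads the global memo dict `dp` through explicitly (state-passing style)
def lnnA (dp : PySem.Dict Int Int) (n : Int) : PySem.Dict Int Int × Int :=
  if n ≤ 1 then (dp, 1)
  else
    match dp.get? n with
    | some v => (dp, v)
    | none =>
      let r := lnnA dp (PySem.Int.floordiv n 2)
      (r.1.insert n (2 * r.2 + 1), 2 * r.2 + 1)
termination_by n.toNat
decreasing_by
  have h2 : PySem.Int.floordiv n 2 = n / 2 := PySem.Int.floordiv_eq_ediv_of_pos (by norm_num)
  rw [h2]; omega

-- rec, with a fuel counter only to make the recursion total in Lean; on Pre_rec (n ≥ 1) the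
-- fuel n.toNat + 1 is never exhausted, since n at least halves at every recursive call.
def recAux : Nat → PySem.Dict Int Int → Int → Int → Int
  | 0, _, _, _ => 0
  | f + 1, dp, n, k =>
    if n = 1 then 1
    else
      let r := lnnA dp n
      let nee := PySem.Int.floordiv r.2 2 + 1
      if k = nee then PySem.Int.mod n 2
      else if k > nee then recAux f r.1 (PySem.Int.floordiv n 2) (k - nee)
      else recAux f r.1 (PySem.Int.floordiv n 2) k

def rec (n : Int) (k : Int) : Int := recAux (n.toNat + 1) PySem.Dict.empty n k

-- ===== PORT B =====
-- the `while n != 1` loop of Source B, with the same fuel-for-totality device as port A;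
-- `1 << (n.bit_length() - 1)` on n ≥ 2 is 2 ^ (bitLength n - 1)
def recAltAux : Nat → Int → Int → Int
  | 0, _, _ => 0
  | f + 1, n, k =>
    if n ≠ 1 then
      let nee : Int := if n ≤ 1 then 1 else 2 ^ (PySem.Int.bitLength n - 1)
      if k = nee then PySem.Int.mod n 2
      else if k > nee then recAltAux f (PySem.Int.floordiv n 2) (k - nee)
      else recAltAux f (PySem.Int.floordiv n 2) k
    else 1

def rec_alt (n : Int) (k : Int) : Int := recAltAux (n.toNat + 1) n k

-- ===== PRECONDITION & SPEC =====
-- Pre_ restricts to the natural domain n ≥ 1 of the sequence problem: for n ≤ 0 A's recursion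
-- depth equals k, so it raises RecursionError for every k ≤ 0 and for every large k, returning
-- only for accidentally small positive k (where B agrees anyway).
def Pre_rec (n : Int) (k : Int) : Prop := 1 ≤ n
instance (n : Int) (k : Int) : Decidable (Pre_rec n k) := by unfold Pre_rec; infer_instance
def pvWitness_rec : Int × Int := (5, 2)

def Spec_rec (n : Int) (k : Int) (out : Int) : Prop := out = rec_alt n k
instance (n : Int) (k : Int) (out : Int) : Decidable (Spec_rec n k out) := by unfold Spec_rec; infer_instance

-- ===== CLAIM (what is proved, stated in full; the proofs are below) =====
def Claim_equal_rec : Prop := ∀ (n : Int) (k : Int), Dom_rec n k → Pre_rec n k → Spec_rec n k (rec n k)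

-- ===== LEMMAS AND PROOFS =====

-- the pure value of lnn
def lnnVal (n : Int) : Int :=
  if n ≤ 1 then 1 else 2 * lnnVal (PySem.Int.floordiv n 2) + 1
termination_by n.toNat
decreasing_by
  have h2 : PySem.Int.floordiv n 2 = n / 2 := PySem.Int.floordiv_eq_ediv_of_pos (by norm_num)
  rw [h2]; omega

-- memo-dict invariant: every entry stores the true lnn value
def DpOK (dp : PySem.Dict Int Int) : Prop := ∀ m v, dp.get? m = some v → v = lnnVal m

theorem floordiv_two_lemmas (n : Int) (h : 2 ≤ n) :
    1 ≤ PySem.Int.floordiv n 2 ∧ PySem.Int.floordiv n 2 < n := by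
  have h2 : PySem.Int.floordiv n 2 = n / 2 := PySem.Int.floordiv_eq_ediv_of_pos (by norm_num)
  rw [h2]; omega

theorem lnnA_spec (n : Int) (dp : PySem.Dict Int Int) (hdp : DpOK dp) :
    (lnnA dp n).2 = lnnVal n ∧ DpOK (lnnA dp n).1 := by
  rw [lnnA]
  by_cases h1 : n ≤ 1
  · rw [if_pos h1, lnnVal, if_pos h1]; exact ⟨rfl, hdp⟩
  · rw [if_neg h1]
    cases hg : dp.get? n with
    | some v => exact ⟨hdp n v hg, hdp⟩
    | none =>
      have ih := lnnA_spec (PySem.Int.floordiv n 2) dp hdp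
      dsimp only
      constructor
      · conv_rhs => rw [lnnVal]
        rw [if_neg h1, ih.1]
      · intro m v hm
        simp only [PySem.Dict.get?_insert] at hm
        split_ifs at hm with hmn
        · subst hmn
          have hv : v = 2 * (lnnA dp (PySem.Int.floordiv m 2)).2 + 1 := by
            exact (Option.some.injEq _ _ ▸ hm).symm
          rw [hv, ih.1]
          conv_rhs => rw [lnnVal]
          rw [if_neg h1]
        · exact ih.2 m v hm
termination_by n.toNat
decreasing_by
  have h2 : PySem.Int.floordiv n 2 = n / 2 := PySem.Int.floordiv_eq_ediv_of_pos (by norm_num)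
  rw [h2]; omega

-- closed form: lnn n = 2 ^ bitLength n - 1 for n ≥ 1
theorem lnnVal_closed (n : Int) (h : 1 ≤ n) :
    lnnVal n = 2 ^ PySem.Int.bitLength n - 1 := by
  rw [lnnVal]
  by_cases h1 : n ≤ 1
  · have : n = 1 := le_antisymm h1 h
    subst this; decide
  · have h2 : 2 ≤ n := by omega
    obtain ⟨hlo, _⟩ := floordiv_two_lemmas n h2
    have ih := lnnVal_closed (PySem.Int.floordiv n 2) hlo
    rw [if_neg h1, ih, PySem.Int.bitLength_of_pos (by omega : (0:Int) < n)]
    have hb : (0:Int) < 2 ^ PySem.Int.bitLength (PySem.Int.floordiv n 2) := by positivity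
    rw [pow_succ]; ring
termination_by n.toNat
decreasing_by
  have h2 : PySem.Int.floordiv n 2 = n / 2 := PySem.Int.floordiv_eq_ediv_of_pos (by norm_num)
  rw [h2]; omega

-- A's midpoint equals B's closed-form midpoint, for n ≥ 2
theorem nee_eq (n : Int) (h : 2 ≤ n) :
    PySem.Int.floordiv (lnnVal n) 2 + 1 = 2 ^ (PySem.Int.bitLength n - 1) := by
  have hbl : PySem.Int.bitLength n = PySem.Int.bitLength (PySem.Int.floordiv n 2) + 1 :=
    PySem.Int.bitLength_of_pos (by omega)
  rw [lnnVal_closed n (by omega), hbl]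
  have hb : (0:Int) < 2 ^ PySem.Int.bitLength (PySem.Int.floordiv n 2) := by positivity
  have h2 : ∀ a : Int, PySem.Int.floordiv a 2 = a / 2 :=
    fun a => PySem.Int.floordiv_eq_ediv_of_pos (by norm_num)
  rw [h2, Nat.add_sub_cancel, pow_succ]
  omega

-- the two fueled loops agree step by step
theorem aux_eq (f : Nat) (n k : Int) (dp : PySem.Dict Int Int)
    (hdp : DpOK dp) (hn : 1 ≤ n) (hf : n.toNat < f) :
    recAux f dp n k = recAltAux f n k := by
  induction f generalizing n k dp with
  | zero => omega
  | succ f ih =>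
    rw [recAux, recAltAux]
    by_cases h1 : n = 1
    · simp [h1]
    · have h2 : 2 ≤ n := by omega
      have hspec := lnnA_spec n dp hdp
      obtain ⟨hlo, hlt⟩ := floordiv_two_lemmas n h2
      rw [if_neg h1, if_pos (show ¬ n = 1 from h1)]
      dsimp only
      have hnee : PySem.Int.floordiv (lnnA dp n).2 2 + 1 = 2 ^ (PySem.Int.bitLength n - 1) := by
        rw [hspec.1]; exact nee_eq n h2
      rw [hnee, if_neg (show ¬ n ≤ 1 by omega)]
      have hfu : (PySem.Int.floordiv n 2).toNat < f := by omega
      split_ifs with hk1 hk2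
      · rfl
      · exact ih _ _ _ hspec.2 hlo hfu
      · exact ih _ _ _ hspec.2 hlo hfu

-- ===== VERDICT (by name: the statement is the Claim_ definition above) =====
theorem rec_spec : Claim_equal_rec := by
  intro n k _ hpre
  unfold Spec_rec rec rec_alt
  exact aux_eq (n.toNat + 1) n k PySem.Dict.empty
    (fun m v hm => by simp [PySem.Dict.get?_empty] at hm) hpre (by omega)
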